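-- pv_equiv track=rewrite | github.com/EleutherAI/ngrams-across-time | ngrams_across_time/language/hf_client.py | get_closest_checkpoint
-- ===== SOURCE A (Python) =====
-- def get_closest_checkpoint(revisions: dict[int, str], target_step: int):
--     steps = sorted(revisions.keys())
--     if not steps:
--         return None
--
--     closest = steps[0]
--     min_diff = abs(target_step - closest)
--
--     for step in steps:
--         diff = abs(target_step - step)
--         if diff < min_diff:
--             min_diff = diff
--             closest = step
--
--     return closest
-- ===== SOURCE B (Python) =====
-- def get_closest_checkpoint(revisions: dict[int, str], target_step: int):
--     # One pass over the sorted keys that stops at the first step >= target: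
--     # the answer is that step or its predecessor, whichever is nearer
--     # (ties go to the smaller step).
--     prev = None
--     for step in sorted(revisions.keys()):
--         if step >= target_step:
--             if prev is None or target_step - prev > step - target_step:
--                 return step
--             return prev
--         prev = step
--     return prev
-- ===== Notes on version B (the rewrite author's own statement) =====
-- stated objective: alternative
-- what changed: Instead of tracking a running argmin of |target-step| over all sorted keys, B scans the sorted keys only until the first key >= target and returns the nearer of that key and its predecessor (ties to the smaller), exiting early.
import Mathlib
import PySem

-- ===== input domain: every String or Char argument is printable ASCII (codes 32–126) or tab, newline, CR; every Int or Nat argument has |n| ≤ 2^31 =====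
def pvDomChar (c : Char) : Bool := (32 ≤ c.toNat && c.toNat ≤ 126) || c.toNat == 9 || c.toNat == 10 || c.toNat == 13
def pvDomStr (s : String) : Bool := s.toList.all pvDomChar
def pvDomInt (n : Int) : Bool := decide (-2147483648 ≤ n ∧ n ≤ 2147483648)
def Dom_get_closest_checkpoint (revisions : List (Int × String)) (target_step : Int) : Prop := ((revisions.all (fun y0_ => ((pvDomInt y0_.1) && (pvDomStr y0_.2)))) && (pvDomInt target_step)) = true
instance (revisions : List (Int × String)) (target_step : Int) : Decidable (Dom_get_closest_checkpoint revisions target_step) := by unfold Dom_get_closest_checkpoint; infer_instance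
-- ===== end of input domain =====

-- B replaces A's full argmin scan by an early-exit scan that compares the first sorted key ≥ target with its predecessor (ties to the smaller); alternative decomposition, same cost class.

-- ===== PORT A =====
-- the body of A's for-loop: update (closest, min_diff) if this step is strictly closer
def aStep (target_step : Int) (cm : Int × Int) (step : Int) : Int × Int :=
  let diff := |target_step - step|
  if diff < cm.2 then (step, diff) else cm

def get_closest_checkpoint (revisions : List (Int × String)) (target_step : Int) : Option Int :=
  let steps := PySem.List.sorted (PySem.Dict.keys (PySem.Dict.ofList revisions)) (fun x => x) false
  match steps with
  | [] => none
  | s0 :: _ => some ((steps.foldl (aStep target_step) (s0, |target_step - s0|)).1)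

-- ===== PORT B =====
-- B's loop: carry the previous (largest-so-far, all < target) step; stop at the first step ≥ target
def altScan (target_step : Int) : Option Int → List Int → Option Int
  | prev, [] => prev
  | prev, step :: rest =>
    if target_step ≤ step then
      match prev with
      | none => some step
      | some p => if target_step - p > step - target_step then some step else some p
    else altScan target_step (some step) rest

def get_closest_checkpoint_alt (revisions : List (Int × String)) (target_step : Int) : Option Int :=
  altScan target_step none (PySem.List.sorted (PySem.Dict.keys (PySem.Dict.ofList revisions)) (fun x => x) false)

-- ===== PRECONDITION & SPEC =====
def Spec_get_closest_checkpoint (revisions : List (Int × String)) (target_step : Int) (out : Option Int) : Prop := out = get_closest_checkpoint_alt revisions target_step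
instance (revisions : List (Int × String)) (target_step : Int) (out : Option Int) : Decidable (Spec_get_closest_checkpoint revisions target_step out) := by unfold Spec_get_closest_checkpoint; infer_instance

-- ===== CLAIM (what is proved, stated in full; the proofs are below) =====
def Claim_equal_get_closest_checkpoint : Prop := ∀ (revisions : List (Int × String)) (target_step : Int), Dom_get_closest_checkpoint revisions target_step → Spec_get_closest_checkpoint revisions target_step (get_closest_checkpoint revisions target_step)

-- ===== LEMMAS AND PROOFS =====

-- proof intermediary: leftmost minimizer of |t - ·| over a list (ties kept on the earlier element)
def lm (t : Int) : List Int → Option Int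
  | [] => none
  | x :: xs =>
    match lm t xs with
    | none => some x
    | some y => if |t - x| ≤ |t - y| then some x else some y

theorem lm_cons (t a : Int) (l : List Int) :
    lm t (a :: l) = match lm t l with
      | none => some a
      | some y => if |t - a| ≤ |t - y| then some a else some y := rfl

theorem lm_mem (t : Int) (xs : List Int) (y : Int) (h : lm t xs = some y) : y ∈ xs := by
  induction xs with
  | nil => simp [lm] at h
  | cons a l ih =>
    rw [lm_cons] at h
    rcases h2 : lm t l with _ | z <;> rw [h2] at h
    · cases h; exact List.mem_cons_self
    · dsimp only at h
      split_ifs at h <;> cases h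
      · exact List.mem_cons_self
      · exact List.mem_cons_of_mem _ (ih h2)

-- absorbing the head comparison: lm over c :: x :: xs equals lm over (better of c, x) :: xs
theorem lm_swap (t c x : Int) (xs : List Int) :
    lm t (c :: x :: xs) = lm t ((if |t - x| < |t - c| then x else c) :: xs) := by
  rcases h : lm t xs with _ | y
  · have hx1 : lm t (x :: xs) = some x := by rw [lm_cons, h]
    have hc1 : lm t (c :: xs) = some c := by rw [lm_cons, h]
    have e1 : lm t (c :: x :: xs) = if |t - c| ≤ |t - x| then some c else some x := by
      rw [lm_cons, hx1]
    rw [e1]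
    split_ifs <;> simp only [hx1, hc1] <;> first | rfl | omega
  · have hc1 : lm t (c :: xs) = if |t - c| ≤ |t - y| then some c else some y := by
      rw [lm_cons, h]
    by_cases hxy : |t - x| ≤ |t - y|
    · have hx1 : lm t (x :: xs) = some x := by
        rw [lm_cons, h]; dsimp only; rw [if_pos hxy]
      have e1 : lm t (c :: x :: xs) = if |t - c| ≤ |t - x| then some c else some x := by
        rw [lm_cons, hx1]
      rw [e1]
      split_ifs  <;> simp only [hx1, hc1] <;> (try split_ifs) <;> first | rfl | omega
    · have hx1 : lm t (x :: xs) = some y := by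
        rw [lm_cons, h]; dsimp only; rw [if_neg hxy]
      have e1 : lm t (c :: x :: xs) = if |t - c| ≤ |t - y| then some c else some y := by
        rw [lm_cons, hx1]
      rw [e1]
      split_ifs  <;> simp only [hx1, hc1] <;> (try split_ifs) <;> first | rfl | omega

-- duplicate head does not change the leftmost minimizer
theorem lm_dup (t c : Int) (xs : List Int) : lm t (c :: c :: xs) = lm t (c :: xs) := by
  rw [lm_swap]; simp

-- a head that is ≥ t and ≤ every later element is the leftmost minimizer
theorem lm_head_min (t x : Int) (xs : List Int) (hx : t ≤ x) (hle : ∀ y ∈ xs, x ≤ y) :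
    lm t (x :: xs) = some x := by
  rw [lm_cons]
  rcases h : lm t xs with _ | y
  · rfl
  · have hy : x ≤ y := hle y (lm_mem t xs y h)
    have : |t - x| ≤ |t - y| := by
      rw [abs_sub_comm t x, abs_sub_comm t y,
        abs_of_nonneg (by omega : (0:Int) ≤ x - t), abs_of_nonneg (by omega : (0:Int) ≤ y - t)]
      omega
    simp [this]

-- A's fold computes the leftmost minimizer
theorem fold_eq_lm (t : Int) (xs : List Int) (c : Int) :
    lm t (c :: xs) = some ((xs.foldl (aStep t) (c, |t - c|)).1) := by
  induction xs generalizing c with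
  | nil => simp [lm]
  | cons x xs ih =>
    rw [lm_swap, List.foldl_cons]
    simp only [aStep]
    split_ifs with h
    · simpa using ih x
    · simpa using ih c

-- B's early-exit scan computes the leftmost minimizer on a sorted list
theorem scan_eq_lm (t : Int) (xs : List Int) (hs : xs.Pairwise (· ≤ ·)) :
    ∀ prev : Option Int,
      (∀ p, prev = some p → p < t ∧ ∀ y ∈ xs, p ≤ y) →
      altScan t prev xs = lm t (prev.toList ++ xs) := by
  induction xs with
  | nil => rintro (_ | p) _ <;> simp [altScan, lm]
  | cons x xs ih =>
    have hx_le : ∀ y ∈ xs, x ≤ y := fun y hy => (List.pairwise_cons.1 hs).1 y hy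
    have htail := ih (List.pairwise_cons.1 hs).2
    rintro (_ | p) hinv
    · simp only [altScan, Option.toList, List.nil_append]
      split_ifs with hx
      · exact (lm_head_min t x xs hx hx_le).symm
      · have hlt : x < t := not_le.1 hx
        have := htail (some x)
          (by rintro q hq; cases hq; exact ⟨hlt, hx_le⟩)
        simpa using this
    · obtain ⟨hp_lt, hp_le⟩ := hinv p rfl
      have hpx : p ≤ x := hp_le x List.mem_cons_self
      simp only [altScan, Option.toList, List.cons_append, List.nil_append]
      split_ifs with hx h2
      · -- t ≤ x and t - p > x - t : the first step ≥ t wins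
        rw [lm_cons, lm_head_min t x xs hx hx_le]
        have hap : |t - p| = t - p := abs_of_nonneg (by omega)
        have hax : |t - x| = x - t := by
          rw [abs_sub_comm]; exact abs_of_nonneg (by omega)
        dsimp only
        rw [hap, hax]
        split_ifs <;> first | rfl | omega
      · -- t ≤ x and t - p ≤ x - t : the predecessor wins
        rw [lm_cons, lm_head_min t x xs hx hx_le]
        have hap : |t - p| = t - p := abs_of_nonneg (by omega)
        have hax : |t - x| = x - t := by
          rw [abs_sub_comm]; exact abs_of_nonneg (by omega)
        dsimp only
        rw [hap, hax]
        split_ifs <;> first | rfl | omega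
      · -- x < t : p is dominated by x, drop it and keep scanning
        have hlt : x < t := not_le.1 hx
        have hdrop : lm t (p :: x :: xs) = lm t (x :: xs) := by
          rw [lm_swap]
          have hap : |t - p| = t - p := abs_of_nonneg (by omega)
          have hax : |t - x| = t - x := abs_of_nonneg (by omega)
          by_cases hc : |t - x| < |t - p|
          · simp [hc]
          · have : p = x := by rw [hap, hax] at hc; omega
            subst this; split_ifs; rfl
        rw [hdrop]
        have := htail (some x)
          (by rintro q hq; cases hq; exact ⟨hlt, hx_le⟩)
        simpa using this

-- ===== VERDICT (by name: the statement is the Claim_ definition above) =====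
theorem get_closest_checkpoint_spec : Claim_equal_get_closest_checkpoint := by
  intro revisions t _
  unfold Spec_get_closest_checkpoint get_closest_checkpoint get_closest_checkpoint_alt
  have hsorted := PySem.List.sorted_pairwise
    (xs := PySem.Dict.keys (PySem.Dict.ofList revisions)) (key := fun x => x)
  rcases h : PySem.List.sorted (PySem.Dict.keys (PySem.Dict.ofList revisions)) (fun x => x) false
    with _ | ⟨s0, rest⟩
  · simp [altScan]
  · rw [h] at hsorted
    have hsorted' : (s0 :: rest).Pairwise (· ≤ ·) := by simpa using hsorted
    have hscan := scan_eq_lm t (s0 :: rest) hsorted' none (by simp)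
    have hfold := fold_eq_lm t (s0 :: rest) s0
    rw [lm_dup] at hfold
    simp only [Option.toList, List.nil_append] at hscan
    dsimp only
    rw [hscan]
    exact hfold.symm
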